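-- pv_equiv track=rewrite | github.com/OsmanBahadirYlmz/4_DataProjects | python_odtü/quiz5/v1.py | process_books
-- ===== SOURCE A (Python) =====
-- def process_books(book_titles):
--     book_counts=[0,0,0,0,0]
--     for i in range( len(book_titles)):
--         book_titles[i]
--         if book_titles[i][0]=="A":
--             book_counts[0]+=1
--
--         if book_titles[i][0]=="B":
--             book_counts[1]+=1
--
--         if book_titles[i][0]=="C":
--             book_counts[2]+=1
--
--         if book_titles[i][0]=="D":
--             book_counts[3]+=1
--
--         if book_titles[i][0]=="E":
--             book_counts[4]+=1
--
--     return book_counts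
-- ===== SOURCE B (Python) =====
-- def process_books(book_titles):
--     # One independent scan per target letter instead of a single pass with five branches.
--     return [sum(1 for t in book_titles if t[0] == c) for c in "ABCDE"]
-- ===== Notes on version B (the rewrite author's own statement) =====
-- stated objective: alternative
-- what changed: A makes one indexed pass updating a 5-slot counter list with five if-branches per element; B instead maps over the five letters 'ABCDE' and counts each with an independent scan of the list.
import Mathlib
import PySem

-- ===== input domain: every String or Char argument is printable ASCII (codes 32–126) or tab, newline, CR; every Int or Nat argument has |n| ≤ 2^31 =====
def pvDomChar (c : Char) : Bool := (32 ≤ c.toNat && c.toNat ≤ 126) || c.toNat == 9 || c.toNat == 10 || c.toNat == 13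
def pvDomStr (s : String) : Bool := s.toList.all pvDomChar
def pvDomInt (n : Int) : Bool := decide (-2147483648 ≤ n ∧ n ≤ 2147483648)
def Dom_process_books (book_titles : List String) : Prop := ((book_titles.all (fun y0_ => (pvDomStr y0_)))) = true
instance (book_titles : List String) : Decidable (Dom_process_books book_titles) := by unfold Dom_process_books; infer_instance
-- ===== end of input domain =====

-- B replaces A's single indexed pass with five if-branches by one independent count per letter of "ABCDE" (objective: alternative decomposition; same behaviour, both raise IndexError on an empty title — excluded by Pre_).

-- ===== PORT A =====
-- A's loop body on one element: t[0] is `pyGetD t.toList 0 ' '` (exact under Pre_: every title nonempty,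
-- so the index 0 is in range); counts[k] += 1 uses List.set/getD directly, exact because the indices 0..4
-- are constant and the counter list always has length 5.
def pbStep (counts : List Int) (t : String) : List Int :=
  let c0 := PySem.List.pyGetD t.toList 0 ' '
  let counts := if c0 = 'A' then counts.set 0 (counts.getD 0 0 + 1) else counts
  let counts := if c0 = 'B' then counts.set 1 (counts.getD 1 0 + 1) else counts
  let counts := if c0 = 'C' then counts.set 2 (counts.getD 2 0 + 1) else counts
  let counts := if c0 = 'D' then counts.set 3 (counts.getD 3 0 + 1) else counts
  let counts := if c0 = 'E' then counts.set 4 (counts.getD 4 0 + 1) else counts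
  counts

def process_books (book_titles : List String) : List Int :=
  (PySem.List.pyRange 0 (book_titles.length : Int) 1).foldl
    (fun counts i => pbStep counts (PySem.List.pyGetD book_titles i "")) [0, 0, 0, 0, 0]

-- ===== PORT B =====
-- t[0] == c, with t[0] ported as in A's side (exact under Pre_)
def pbHit (t : String) (c : Char) : Bool := PySem.List.pyGetD t.toList 0 ' ' = c

-- sum(1 for t in book_titles if t[0] == c), one fold per letter
def process_books_alt (book_titles : List String) : List Int :=
  ['A', 'B', 'C', 'D', 'E'].map
    (fun c => book_titles.foldl (fun acc t => if pbHit t c then acc + 1 else acc) (0 : Int))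

-- ===== PRECONDITION & SPEC =====
-- Pre_ excludes inputs containing an empty title: there Python's t[0] raises IndexError in both A and B.
def Pre_process_books (book_titles : List String) : Prop := ∀ t ∈ book_titles, t ≠ ""
instance (book_titles : List String) : Decidable (Pre_process_books book_titles) := by
  unfold Pre_process_books; infer_instance

def pvWitness_process_books : List String := ["Apple", "banana", "Cat", "E", "Dune"]

def Spec_process_books (book_titles : List String) (out : List Int) : Prop := out = process_books_alt book_titles
instance (book_titles : List String) (out : List Int) : Decidable (Spec_process_books book_titles out) := by unfold Spec_process_books; infer_instance

-- ===== CLAIM (what is proved, stated in full; the proofs are below) =====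
def Claim_equal_process_books : Prop := ∀ (book_titles : List String), Dom_process_books book_titles → Pre_process_books book_titles → Spec_process_books book_titles (process_books book_titles)

-- ===== LEMMAS AND PROOFS =====

-- A's per-element update, in closed form: at most one of the five branches fires.
theorem pbStep_closed (a b c d e : Int) (t : String) :
    pbStep [a, b, c, d, e] t =
      [a + (if pbHit t 'A' then 1 else 0),
       b + (if pbHit t 'B' then 1 else 0),
       c + (if pbHit t 'C' then 1 else 0),
       d + (if pbHit t 'D' then 1 else 0),
       e + (if pbHit t 'E' then 1 else 0)] := by
  simp only [pbStep, pbHit]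
  split_ifs <;> simp_all

-- Loop invariant for A's fold, stated against five per-letter counts.
theorem pbFold_inv (bt : List String) (a b c d e : Int) :
    bt.foldl pbStep [a, b, c, d, e] =
      [a + (bt.countP (fun t => pbHit t 'A') : Int),
       b + (bt.countP (fun t => pbHit t 'B') : Int),
       c + (bt.countP (fun t => pbHit t 'C') : Int),
       d + (bt.countP (fun t => pbHit t 'D') : Int),
       e + (bt.countP (fun t => pbHit t 'E') : Int)] := by
  induction bt generalizing a b c d e with
  | nil => simp
  | cons t ts ih =>
    simp only [List.foldl_cons, List.countP_cons]
    rw [pbStep_closed, ih]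
    push_cast
    simp only [List.cons.injEq]
    refine ⟨by ring, by ring, by ring, by ring, ⟨by ring, trivial⟩⟩

-- ===== VERDICT (by name: the statement is the Claim_ definition above) =====
theorem process_books_spec : Claim_equal_process_books := by
  intro bt _ _
  unfold Spec_process_books process_books process_books_alt
  rw [PySem.List.foldl_pyRange_zero_pyGetD' bt "" pbStep, pbFold_inv]
  simp [PySem.List.foldl_count_if]
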